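-- pv_equiv track=rewrite | github.com/Rick0423/Octree | python_script/hash_gen.py | encode_to_bits
-- ===== SOURCE A (Python) =====
-- def encode_to_bits(level, offsets):
--     """将level和offsets编码为18位二进制数（3*6=18位）
--
--     Args:
--         level: 有效offset的层级数 (0-5)
--         offsets: 包含5个offset值的列表，每个值范围为0-5
--
--     Returns:
--         18位二进制编码
--     """
--     # 确保输入合法
--     assert 0 <= level <= 5, "Level should be between 0 and 5"
--     assert len(offsets) == 5, "Should have 5 offsets"
--     for offset in offsets:
--         assert 0 <= offset <= 5, "Each offset should be between 0 and 5"
--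
--     # 转换为18位编码
--     encoded = level
--     for i, offset in enumerate(offsets):
--         encoded = (encoded << 3) | offset  # 每个offset占3位
--
--     return encoded
-- ===== SOURCE B (Python) =====
-- def encode_to_bits(level, offsets):
--     """将level和offsets编码为18位二进制数（3*6=18位）"""
--     assert 0 <= level <= 5, "Level should be between 0 and 5"
--     assert len(offsets) == 5, "Should have 5 offsets"
--     for offset in offsets:
--         assert 0 <= offset <= 5, "Each offset should be between 0 and 5"
--     binary_string = format(level, '03b') + ''.join(format(offset, '03b') for offset in offsets)
--     return int(binary_string, 2)
-- ===== Notes on version B (the rewrite author's own statement) =====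
-- stated objective: idiomatic
-- what changed: B replaces the shift-and-or accumulation loop by building an 18-character binary string (format(level,'03b') plus five 3-bit fields joined from a comprehension) and parsing it once with int(s, 2).
import Mathlib
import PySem

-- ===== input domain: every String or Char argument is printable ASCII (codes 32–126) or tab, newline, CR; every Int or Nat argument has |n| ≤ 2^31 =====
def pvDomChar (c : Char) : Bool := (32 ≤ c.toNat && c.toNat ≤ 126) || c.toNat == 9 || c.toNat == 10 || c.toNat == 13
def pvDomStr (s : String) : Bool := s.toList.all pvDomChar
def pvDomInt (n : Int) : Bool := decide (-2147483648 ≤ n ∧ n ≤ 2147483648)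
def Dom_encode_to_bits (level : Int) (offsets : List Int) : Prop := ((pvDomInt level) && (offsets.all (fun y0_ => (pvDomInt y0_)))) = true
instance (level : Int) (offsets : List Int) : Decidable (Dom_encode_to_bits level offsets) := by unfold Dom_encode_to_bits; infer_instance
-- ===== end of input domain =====

-- B builds an 18-character binary string (3-bit fields) and parses it with int(s,2),
-- instead of A's shift-and-or integer accumulation; same value on all valid inputs.


-- ===== PORT A =====
-- the asserts of A raise exactly outside Pre_encode_to_bits below; after them the loop
-- 'encoded = (encoded << 3) | offset' is this foldl (Python << / | on ints = <<< / PySem.Int.bor)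
def encode_to_bits (level : Int) (offsets : List Int) : Int :=
  offsets.foldl (fun encoded offset => PySem.Int.bor (encoded <<< (3 : Int)) offset) level

-- ===== PORT B =====
-- format(x, '03b') for 0 ≤ x ≤ 7: exactly the three binary digits, zero-padded
def pvBin3 (x : Int) : List Char :=
  [(if PySem.Int.mod (PySem.Int.floordiv x 4) 2 = 1 then '1' else '0'),
   (if PySem.Int.mod (PySem.Int.floordiv x 2) 2 = 1 then '1' else '0'),
   (if PySem.Int.mod x 2 = 1 then '1' else '0')]

-- int(s, 2) on a string of '0'/'1' characters
def pvParseBin (s : List Char) : Int :=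
  s.foldl (fun acc c => acc * 2 + (if c = '1' then 1 else 0)) 0

def encode_to_bits_alt (level : Int) (offsets : List Int) : Int :=
  pvParseBin (pvBin3 level ++ offsets.flatMap pvBin3)

-- ===== PRECONDITION & SPEC =====
-- exactly the inputs A's three asserts accept (outside them Python raises AssertionError)
def Pre_encode_to_bits (level : Int) (offsets : List Int) : Prop :=
  0 ≤ level ∧ level ≤ 5 ∧ offsets.length = 5 ∧ ∀ o ∈ offsets, 0 ≤ o ∧ o ≤ 5
instance (level : Int) (offsets : List Int) : Decidable (Pre_encode_to_bits level offsets) := by unfold Pre_encode_to_bits; infer_instance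
def pvWitness_encode_to_bits : Int × List Int := (3, [0, 5, 1, 4, 2])

def Spec_encode_to_bits (level : Int) (offsets : List Int) (out : Int) : Prop := out = encode_to_bits_alt level offsets
instance (level : Int) (offsets : List Int) (out : Int) : Decidable (Spec_encode_to_bits level offsets out) := by unfold Spec_encode_to_bits; infer_instance

-- ===== CLAIM (what is proved, stated in full; the proofs are below) =====
def Claim_equal_encode_to_bits : Prop := ∀ (level : Int) (offsets : List Int), Dom_encode_to_bits level offsets → Pre_encode_to_bits level offsets → Spec_encode_to_bits level offsets (encode_to_bits level offsets)

-- ===== LEMMAS AND PROOFS =====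

-- A's step on a nonnegative accumulator and a small offset is plain arithmetic
theorem pvAstep_eq (acc o : Int) (hacc : 0 ≤ acc) (ho0 : 0 ≤ o) (ho5 : o ≤ 5) :
    PySem.Int.bor (acc <<< (3 : Int)) o = acc * 8 + o := by
  obtain ⟨n, rfl⟩ := Int.eq_ofNat_of_zero_le hacc
  obtain ⟨r, rfl⟩ := Int.eq_ofNat_of_zero_le ho0
  have hr : r < 2 ^ 3 := by exact_mod_cast show (r:Int) < 8 by omega
  have h3 : (3 : Int) = ((3 : Nat) : Int) := by norm_num
  rw [h3, Int.shiftLeft_natCast, PySem.Int.bor_natCast, ← Nat.shiftLeft_add_eq_or_of_lt hr n]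
  push_cast [Nat.shiftLeft_eq]
  ring

-- parsing the 3-bit field of 0 ≤ x ≤ 5 continues the fold with acc*8 + x
theorem pvParse_bin3 (acc x : Int) (hx0 : 0 ≤ x) (hx5 : x ≤ 5) :
    List.foldl (fun acc c => acc * 2 + (if c = '1' then 1 else 0)) acc (pvBin3 x)
      = acc * 8 + x := by
  interval_cases x <;> simp [pvBin3, List.foldl, PySem.Int.floordiv, PySem.Int.mod] <;> ring

-- both folds over the offsets agree, from any nonnegative common accumulator
theorem pvFolds_eq (offsets : List Int) (hoff : ∀ o ∈ offsets, 0 ≤ o ∧ o ≤ 5) :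
    ∀ acc : Int, 0 ≤ acc →
      offsets.foldl (fun encoded offset => PySem.Int.bor (encoded <<< (3 : Int)) offset) acc
        = List.foldl (fun acc c => acc * 2 + (if c = '1' then 1 else 0)) acc
            (offsets.flatMap pvBin3) := by
  induction offsets with
  | nil => intro acc _; rfl
  | cons o rest ih =>
    intro acc hacc
    obtain ⟨⟨ho0, ho5⟩, hrest⟩ := List.forall_mem_cons.mp hoff
    simp only [List.foldl_cons, List.flatMap_cons, List.foldl_append]
    rw [pvAstep_eq acc o hacc ho0 ho5, pvParse_bin3 acc o ho0 ho5]
    exact ih hrest (acc * 8 + o) (by nlinarith)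

-- ===== VERDICT (by name: the statement is the Claim_ definition above) =====
theorem encode_to_bits_spec : Claim_equal_encode_to_bits := by
  intro level offsets _ ⟨hl0, hl5, _, hoff⟩
  unfold Spec_encode_to_bits encode_to_bits encode_to_bits_alt pvParseBin
  rw [List.foldl_append, pvParse_bin3 0 level hl0 hl5]
  simpa using pvFolds_eq offsets hoff level hl0
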